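-- pv_equiv track=rewrite | github.com/0017-alt/STEP2023 | week2/kadai4/cache.py | calculate_hash
-- ===== SOURCE A (Python) =====
-- prime_list_alphabet = [5,  7,  11, 13, 19, 23, 29, 31, 41, 43, 47, 53, 59, 61, 67, 71, 79, 83, 89, 97, 101, 103, 109, 113, 127, 131]
--
-- prime_list_number = [137, 139, 149, 157, 163, 167, 173, 179, 181, 191]
--
-- def calculate_hash(key):
-- 	assert type(key) == str
-- 	hash = 0
-- 	for i in key:
-- 		if (97 <= ord(i) and ord(i) <= 122):
-- 			hash += prime_list_alphabet[ord(i) - 97]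
-- 		elif (48 <= ord(i) and ord(i) <= 57):
-- 			hash += prime_list_number[ord(i) - 48]
-- 	return hash
-- ===== SOURCE B (Python) =====
-- prime_list_alphabet = [5,  7,  11, 13, 19, 23, 29, 31, 41, 43, 47, 53, 59, 61, 67, 71, 79, 83, 89, 97, 101, 103, 109, 113, 127, 131]
--
-- prime_list_number = [137, 139, 149, 157, 163, 167, 173, 179, 181, 191]
--
-- def _weight(c):
-- 	o = ord(c)
-- 	if 97 <= o <= 122:
-- 		return prime_list_alphabet[o - 97]
-- 	elif 48 <= o <= 57:
-- 		return prime_list_number[o - 48]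
-- 	return 0
--
-- def calculate_hash(key):
-- 	assert type(key) == str
-- 	freq = {}
-- 	for c in key:
-- 		freq[c] = freq.get(c, 0) + 1
-- 	total = 0
-- 	for c, n in freq.items():
-- 		total += _weight(c) * n
-- 	return total
-- ===== Notes on version B (the rewrite author's own statement) =====
-- stated objective: alternative
-- what changed: B first builds a character-frequency dictionary in one pass and then sums weight*count over the distinct characters, instead of A's per-character accumulation over the whole string.
import Mathlib
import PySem

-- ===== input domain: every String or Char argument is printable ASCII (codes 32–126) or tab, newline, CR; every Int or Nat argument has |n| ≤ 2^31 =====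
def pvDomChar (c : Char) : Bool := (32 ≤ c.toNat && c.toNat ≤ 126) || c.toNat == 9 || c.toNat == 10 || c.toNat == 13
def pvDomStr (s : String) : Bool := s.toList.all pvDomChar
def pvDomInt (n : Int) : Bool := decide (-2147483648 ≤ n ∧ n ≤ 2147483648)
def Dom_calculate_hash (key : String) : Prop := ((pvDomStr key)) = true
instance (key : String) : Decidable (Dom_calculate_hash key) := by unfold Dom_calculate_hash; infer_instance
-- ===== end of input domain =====

-- B aggregates occurrences into a frequency dict first and sums weight*count over distinct
-- characters, instead of A's per-character accumulation; objective: alternative (same cost).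

def prime_list_alphabet : List Int := [5, 7, 11, 13, 19, 23, 29, 31, 41, 43, 47, 53, 59, 61, 67, 71, 79, 83, 89, 97, 101, 103, 109, 113, 127, 131]

def prime_list_number : List Int := [137, 139, 149, 157, 163, 167, 173, 179, 181, 191]

-- ===== PORT A =====
-- indexing is by pyGetD; under each guard the index is provably in range, so it is exact
def calculate_hash (key : String) : Int :=
  key.toList.foldl
    (fun hash i =>
      if 97 ≤ (i.toNat : Int) ∧ (i.toNat : Int) ≤ 122 then
        hash + PySem.List.pyGetD prime_list_alphabet ((i.toNat : Int) - 97) 0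
      else if 48 ≤ (i.toNat : Int) ∧ (i.toNat : Int) ≤ 57 then
        hash + PySem.List.pyGetD prime_list_number ((i.toNat : Int) - 48) 0
      else hash) 0

-- ===== PORT B =====
def pvWeight (c : Char) : Int :=
  if 97 ≤ (c.toNat : Int) ∧ (c.toNat : Int) ≤ 122 then
    PySem.List.pyGetD prime_list_alphabet ((c.toNat : Int) - 97) 0
  else if 48 ≤ (c.toNat : Int) ∧ (c.toNat : Int) ≤ 57 then
    PySem.List.pyGetD prime_list_number ((c.toNat : Int) - 48) 0
  else 0

def calculate_hash_alt (key : String) : Int :=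
  let freq : PySem.Dict Char Int :=
    key.toList.foldl (fun d c => d.insert c (d.getD c 0 + 1)) PySem.Dict.empty
  freq.items.foldl (fun total p => total + pvWeight p.1 * p.2) 0

-- ===== PRECONDITION & SPEC =====
def Spec_calculate_hash (key : String) (out : Int) : Prop := out = calculate_hash_alt key
instance (key : String) (out : Int) : Decidable (Spec_calculate_hash key out) := by unfold Spec_calculate_hash; infer_instance

-- ===== CLAIM (what is proved, stated in full; the proofs are below) =====
def Claim_equal_calculate_hash : Prop := ∀ (key : String), Dom_calculate_hash key → Spec_calculate_hash key (calculate_hash key)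

-- ===== LEMMAS AND PROOFS =====

-- folding '+ f c' is summing the mapped list
theorem pv_foldl_add {α : Type} (f : α → Int) :
    ∀ (xs : List α) (h : Int), xs.foldl (fun a c => a + f c) h = h + (xs.map f).sum := by
  intro xs
  induction xs with
  | nil => intro h; simp
  | cons x xs ih => intro h; simp [List.foldl_cons, ih]; ring

theorem pv_sum_filter_eq (w : Char → Int) (k : Char) :
    ∀ (xs : List Char), ((xs.filter (fun x => x == k)).map w).sum = w k * (xs.count k : Int) := by
  intro xs
  induction xs with
  | nil => simp
  | cons x xs ih =>
    by_cases hx : x = k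
    · subst hx
      simp [ih]
      ring
    · simp [hx, ih]

-- sum over a Nodup list of keys covering xs of weight*count equals the plain sum over xs
theorem pv_sum_counts (w : Char → Int) :
    ∀ (d : List Char), d.Nodup → ∀ (xs : List Char), (∀ x ∈ xs, x ∈ d) →
      (d.map (fun k => w k * (xs.count k : Int))).sum = (xs.map w).sum := by
  intro d
  induction d with
  | nil =>
    intro _ xs hcov
    have : xs = [] := by
      cases xs with
      | nil => rfl
      | cons a as => exact absurd (hcov a (by simp)) (by simp)
    simp [this]
  | cons k ds ih =>
    intro hnd xs hcov
    have hknd : k ∉ ds := (List.nodup_cons.mp hnd).1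
    have hds : ds.Nodup := (List.nodup_cons.mp hnd).2
    have hperm : ((xs.filter (fun x => x == k)) ++ (xs.filter (fun x => !(x == k)))).Perm xs :=
      List.filter_append_perm _ xs
    have hsplit : (xs.map w).sum
        = ((xs.filter (fun x => x == k)).map w).sum
          + ((xs.filter (fun x => !(x == k))).map w).sum := by
      have := (hperm.map w).sum_eq
      simpa [List.map_append] using this.symm
    have hcov' : ∀ x ∈ xs.filter (fun x => !(x == k)), x ∈ ds := by
      intro x hx
      have hmem := List.mem_of_mem_filter hx
      have hne : !(x == k) = true := by
        have := List.of_mem_filter hx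
        simpa using this
      rcases List.mem_cons.mp (hcov x hmem) with h | h
      · subst h; simp at hne
      · exact h
    have hih := ih hds (xs.filter (fun x => !(x == k))) hcov'
    have hcnt : ∀ k' ∈ ds,
        ((xs.filter (fun x => !(x == k))).count k' : Int) = (xs.count k' : Int) := by
      intro k' hk'
      have hne : k' ≠ k := fun h => hknd (h ▸ hk')
      congr 1
      simp [List.count_filter, hne]
    have hmapeq : (ds.map (fun k' => w k' * (xs.count k' : Int))).sum
        = (ds.map (fun k' => w k' * ((xs.filter (fun x => !(x == k))).count k' : Int))).sum := by
      have : ∀ k' ∈ ds, w k' * (xs.count k' : Int)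
          = w k' * ((xs.filter (fun x => !(x == k))).count k' : Int) := by
        intro k' hk'; rw [hcnt k' hk']
      rw [List.map_congr_left this]
    calc ((k :: ds).map (fun k' => w k' * (xs.count k' : Int))).sum
        = w k * (xs.count k : Int) + (ds.map (fun k' => w k' * (xs.count k' : Int))).sum := by
          simp
      _ = ((xs.filter (fun x => x == k)).map w).sum
          + ((xs.filter (fun x => !(x == k))).map w).sum := by
          rw [pv_sum_filter_eq, hmapeq, hih]
      _ = (xs.map w).sum := hsplit.symm

-- A's loop body accumulates exactly pvWeight
theorem pv_a_body (h : Int) (c : Char) :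
    (if 97 ≤ (c.toNat : Int) ∧ (c.toNat : Int) ≤ 122 then
        h + PySem.List.pyGetD prime_list_alphabet ((c.toNat : Int) - 97) 0
      else if 48 ≤ (c.toNat : Int) ∧ (c.toNat : Int) ≤ 57 then
        h + PySem.List.pyGetD prime_list_number ((c.toNat : Int) - 48) 0
      else h) = h + pvWeight c := by
  unfold pvWeight
  split_ifs <;> simp

-- ===== VERDICT (by name: the statement is the Claim_ definition above) =====
theorem calculate_hash_spec : Claim_equal_calculate_hash := by
  intro key _
  unfold Spec_calculate_hash calculate_hash calculate_hash_alt
  simp only [pv_a_body]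
  rw [PySem.Dict.foldl_insert_getD_add_one_eq_counter, PySem.Dict.items_counter,
      pv_foldl_add, pv_foldl_add]
  simp only [List.map_map, zero_add]
  exact (pv_sum_counts pvWeight (PySem.Set.ofList key.toList) (PySem.Set.nodup_ofList _)
    key.toList (fun x hx => (PySem.Set.mem_ofList _ _).mpr hx)).symm
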